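-- pv_equiv track=rewrite | github.com/SeungMin-Park-psm1757/MVP_Military_basic_rule_finder | streamlit_app.py | load_source_type_filter_groups
-- ===== SOURCE A (Python) =====
-- SOURCE_TYPE_ORDER = [
--     "law_text",
--     "revision_reason",
--     "old_new_comparison",
--     "history_note",
-- ]
--
-- FILTER_GROUP_ORDER = ["법령", "개정이유", "신구 비교", "기타"]
--
-- FILTER_GROUP_SOURCE_TYPES = {
--     "법령": ["law_text"],
--     "개정이유": ["revision_reason"],
--     "신구 비교": ["old_new_comparison"],
-- }
--
-- def ordered_source_types(source_types: list[str]) -> list[str]: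
--     known = [value for value in SOURCE_TYPE_ORDER if value in source_types]
--     extra = sorted(value for value in source_types if value not in SOURCE_TYPE_ORDER)
--     return known + extra
--
-- def load_source_type_options(rows: list[dict]) -> list[str]:
--     available = {str(row["source_type"]) for row in rows if row.get("source_type")}
--     return ordered_source_types(list(available))
--
-- def _other_source_types(source_types: list[str]) -> list[str]:
--     primary = {value for values in FILTER_GROUP_SOURCE_TYPES.values() for value in values}
--     return [value for value in ordered_source_types(source_types) if value not in primary]
--
-- def load_source_type_filter_groups(rows: list[dict]) -> list[str]:
--     available_source_types = load_source_type_options(rows)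
--     options: list[str] = []
--     for label in FILTER_GROUP_ORDER:
--         if label == "기타":
--             if _other_source_types(available_source_types):
--                 options.append(label)
--             continue
--         if any(source_type in available_source_types for source_type in FILTER_GROUP_SOURCE_TYPES[label]):
--             options.append(label)
--     return options
-- ===== SOURCE B (Python) =====
-- FILTER_GROUP_ORDER = ["법령", "개정이유", "신구 비교", "기타"]
--
-- FILTER_GROUP_SOURCE_TYPES = {
--     "법령": ["law_text"],
--     "개정이유": ["revision_reason"],
--     "신구 비교": ["old_new_comparison"],
-- }
--
-- def load_source_type_filter_groups(rows: list[dict]) -> list[str]: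
--     # reverse index: source_type -> filter-group label
--     label_of = {st: label for label, sts in FILTER_GROUP_SOURCE_TYPES.items() for st in sts}
--     # one pass over rows: map each available source type straight to its label
--     triggered = {label_of.get(str(row["source_type"]), "기타")
--                  for row in rows if row.get("source_type")}
--     return [label for label in FILTER_GROUP_ORDER if label in triggered]
-- ===== Notes on version B (the rewrite author's own statement) =====
-- stated objective: simpler
-- what changed: Replaces A's staged pipeline (build+order the available source types, then per label scan them and run the ordered/other-filter machinery) with a reverse index source_type->label and one pass over the rows that maps each available source type to its label (default '기타'), then filters the fixed label order by the triggered set.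
import Mathlib
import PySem

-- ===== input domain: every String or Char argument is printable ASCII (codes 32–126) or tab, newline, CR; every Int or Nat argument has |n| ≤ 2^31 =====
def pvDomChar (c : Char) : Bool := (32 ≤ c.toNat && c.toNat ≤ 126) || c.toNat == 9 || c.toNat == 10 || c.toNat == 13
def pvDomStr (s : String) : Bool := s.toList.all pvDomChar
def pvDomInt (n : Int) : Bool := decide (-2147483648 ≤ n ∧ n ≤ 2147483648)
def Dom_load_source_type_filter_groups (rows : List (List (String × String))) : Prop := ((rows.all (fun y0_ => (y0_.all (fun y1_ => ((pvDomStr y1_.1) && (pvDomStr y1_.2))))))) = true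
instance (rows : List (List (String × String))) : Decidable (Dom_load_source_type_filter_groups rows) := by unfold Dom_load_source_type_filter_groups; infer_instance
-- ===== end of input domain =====

-- B replaces A's staged pipeline (later re-ordered available-type list scanned per label) by a
-- reverse index source_type -> label and one pass over the rows; same return value, simpler.

-- ===== PORT A =====
def pvSourceTypeOrder : List String :=
  ["law_text", "revision_reason", "old_new_comparison", "history_note"]

def pvFilterGroupOrder : List String := ["법령", "개정이유", "신구 비교", "기타"]

def pvFilterGroupSourceTypes : PySem.Dict String (List String) :=
  PySem.Dict.ofList [("법령", ["law_text"]), ("개정이유", ["revision_reason"]), ("신구 비교", ["old_new_comparison"])]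

def ordered_source_types (source_types : List String) : List String :=
  let known := pvSourceTypeOrder.filter (fun v => source_types.contains v)
  let extra := PySem.List.sorted (source_types.filter (fun v => !pvSourceTypeOrder.contains v)) (fun x => x) false
  known ++ extra

def load_source_type_options (rows : List (List (String × String))) : List String :=
  let available : PySem.Set String := rows.foldl (fun s row =>
    match (PySem.Dict.mk row).get? "source_type" with
    | some v => if v = "" then s else PySem.Set.add s v   -- str(v) = v on strings
    | none => s) PySem.Set.empty
  ordered_source_types available

def other_source_types (source_types : List String) : List String :=
  let primary : PySem.Set String := PySem.Set.ofList (pvFilterGroupSourceTypes.values.flatMap (fun vs => vs))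
  (ordered_source_types source_types).filter (fun v => !primary.contains v)

def load_source_type_filter_groups (rows : List (List (String × String))) : List String :=
  let available := load_source_type_options rows
  pvFilterGroupOrder.foldl (fun options label =>
    if label = "기타" then
      if other_source_types available ≠ [] then options ++ [label] else options
    else
      -- FILTER_GROUP_SOURCE_TYPES[label]: label is always a key here, so getD [] is exact
      if (pvFilterGroupSourceTypes.getD label []).any (fun st => available.contains st) then
        options ++ [label]
      else options) []

-- ===== PORT B =====
def pvLabelOf : PySem.Dict String String :=
  pvFilterGroupSourceTypes.items.foldl
    (fun d p => p.2.foldl (fun d st => d.insert st p.1) d) PySem.Dict.empty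

def load_source_type_filter_groups_alt (rows : List (List (String × String))) : List String :=
  let triggered : PySem.Set String := PySem.Set.ofList (rows.filterMap (fun row =>
    match (PySem.Dict.mk row).get? "source_type" with
    | some v => if v = "" then none else some (pvLabelOf.getD v "기타")
    | none => none))
  pvFilterGroupOrder.filter (fun l => PySem.Set.contains triggered l)

-- ===== PRECONDITION & SPEC =====
def Spec_load_source_type_filter_groups (rows : List (List (String × String))) (out : List String) : Prop := out = load_source_type_filter_groups_alt rows
instance (rows : List (List (String × String))) (out : List String) : Decidable (Spec_load_source_type_filter_groups rows out) := by unfold Spec_load_source_type_filter_groups; infer_instance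

-- ===== CLAIM (what is proved, stated in full; the proofs are below) =====
def Claim_equal_load_source_type_filter_groups : Prop := ∀ (rows : List (List (String × String))), Dom_load_source_type_filter_groups rows → Spec_load_source_type_filter_groups rows (load_source_type_filter_groups rows)

-- ===== LEMMAS AND PROOFS =====

-- the qualifying source-type values, in row order
def pvVals (rows : List (List (String × String))) : List String :=
  rows.filterMap (fun row =>
    match (PySem.Dict.mk row).get? "source_type" with
    | some v => if v = "" then none else some v
    | none => none)

lemma pvA_available (rows : List (List (String × String))) (s : PySem.Set String) :
    rows.foldl (fun s row =>
      match (PySem.Dict.mk row).get? "source_type" with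
      | some v => if v = "" then s else PySem.Set.add s v
      | none => s) s = PySem.Set.update s (pvVals rows) := by
  induction rows generalizing s with
  | nil => simp [pvVals, PySem.Set.update]
  | cons r rs ih =>
    simp only [pvVals, List.filterMap_cons, List.foldl_cons]
    cases h : (PySem.Dict.mk r).get? "source_type" with
    | none => simpa [pvVals] using ih s
    | some v =>
      by_cases hv : v = "" <;>
        simp [hv, pvVals, ih, PySem.Set.update]

lemma pvB_vals (rows : List (List (String × String))) :
    rows.filterMap (fun row =>
      match (PySem.Dict.mk row).get? "source_type" with
      | some v => if v = "" then none else some (pvLabelOf.getD v "기타")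
      | none => none) = (pvVals rows).map (fun v => pvLabelOf.getD v "기타") := by
  induction rows with
  | nil => simp [pvVals]
  | cons r rs ih =>
    simp only [pvVals, List.filterMap_cons] at *
    cases h : (PySem.Dict.mk r).get? "source_type" with
    | none => simpa using ih
    | some v => by_cases hv : v = "" <;> simp [hv, ih]

lemma pvMem_ordered (S : List String) (x : String) :
    x ∈ ordered_source_types S ↔ x ∈ S := by
  simp only [ordered_source_types, List.mem_append, List.mem_filter,
    PySem.List.mem_sorted]
  by_cases hx : x ∈ pvSourceTypeOrder <;>
    simp [hx]

lemma pvG_eq (v : String) :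
    pvLabelOf.getD v "기타" =
      if v = "law_text" then "법령"
      else if v = "revision_reason" then "개정이유"
      else if v = "old_new_comparison" then "신구 비교"
      else "기타" := by
  have : pvLabelOf = PySem.Dict.mk
      [("law_text", "법령"), ("revision_reason", "개정이유"), ("old_new_comparison", "신구 비교")] := by
    decide
  by_cases h1 : v = "law_text"
  · subst h1; decide
  by_cases h2 : v = "revision_reason"
  · subst h2; decide
  by_cases h3 : v = "old_new_comparison"
  · subst h3; decide
  simp [this, PySem.Dict.getD_eq_get?_getD, PySem.Dict.get?_mk_cons, h1, h2, h3,
    Ne.symm h1, Ne.symm h2, Ne.symm h3]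
  rfl

lemma pvG_law (v : String) : (pvLabelOf.getD v "기타" = "법령") ↔ v = "law_text" := by
  rw [pvG_eq]; split_ifs <;> simp_all

lemma pvG_rev (v : String) : (pvLabelOf.getD v "기타" = "개정이유") ↔ v = "revision_reason" := by
  rw [pvG_eq]; split_ifs <;> simp_all

lemma pvG_old (v : String) : (pvLabelOf.getD v "기타" = "신구 비교") ↔ v = "old_new_comparison" := by
  rw [pvG_eq]; split_ifs <;> simp_all

lemma pvG_other (v : String) :
    (pvLabelOf.getD v "기타" = "기타") ↔
      (v ≠ "law_text" ∧ v ≠ "revision_reason" ∧ v ≠ "old_new_comparison") := by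
  rw [pvG_eq]; split_ifs <;> simp_all

-- ===== VERDICT (by name: the statement is the Claim_ definition above) =====
theorem load_source_type_filter_groups_spec : Claim_equal_load_source_type_filter_groups := by
  intro rows _
  unfold Spec_load_source_type_filter_groups
  unfold load_source_type_filter_groups load_source_type_filter_groups_alt load_source_type_options
  rw [pvA_available, pvB_vals]
  generalize pvVals rows = V
  have hp : (PySem.Set.ofList (pvFilterGroupSourceTypes.values.flatMap (fun vs => vs)) : List String) = ["law_text", "revision_reason", "old_new_comparison"] := by decide
  have hd1 : pvFilterGroupSourceTypes.getD "법령" [] = ["law_text"] := by decide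
  have hd2 : pvFilterGroupSourceTypes.getD "개정이유" [] = ["revision_reason"] := by decide
  have hd3 : pvFilterGroupSourceTypes.getD "신구 비교" [] = ["old_new_comparison"] := by decide
  simp only [pvFilterGroupOrder, List.foldl_cons, List.foldl_nil, List.filter_cons,
    List.filter_nil, other_source_types, hp, hd1, hd2, hd3, PySem.Set.update_empty,
    String.reduceEq, reduceIte, List.any_cons, List.any_nil, Bool.or_false, ne_eq,
    List.nil_append, if_true]
  have m1 : ((ordered_source_types (PySem.Set.ofList V)).contains "law_text" = true) ↔ "law_text" ∈ V := by
    simp [pvMem_ordered, PySem.Set.mem_ofList]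
  have m2 : ((ordered_source_types (PySem.Set.ofList V)).contains "revision_reason" = true) ↔ "revision_reason" ∈ V := by
    simp [pvMem_ordered, PySem.Set.mem_ofList]
  have m3 : ((ordered_source_types (PySem.Set.ofList V)).contains "old_new_comparison" = true) ↔ "old_new_comparison" ∈ V := by
    simp [pvMem_ordered, PySem.Set.mem_ofList]
  have m4 : (¬ List.filter (fun v => !PySem.Set.contains ["law_text", "revision_reason", "old_new_comparison"] v)
        (ordered_source_types (ordered_source_types (PySem.Set.ofList V))) = []) ↔
      ∃ v ∈ V, v ≠ "law_text" ∧ v ≠ "revision_reason" ∧ v ≠ "old_new_comparison" := by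
    simp [List.filter_eq_nil_iff, pvMem_ordered, PySem.Set.mem_ofList]
  have b1 : ((PySem.Set.ofList (List.map (fun v => pvLabelOf.getD v "기타") V)).contains "법령" = true) ↔ "law_text" ∈ V := by
    simp [PySem.Set.mem_ofList, pvG_law]
  have b2 : ((PySem.Set.ofList (List.map (fun v => pvLabelOf.getD v "기타") V)).contains "개정이유" = true) ↔ "revision_reason" ∈ V := by
    simp [PySem.Set.mem_ofList, pvG_rev]
  have b3 : ((PySem.Set.ofList (List.map (fun v => pvLabelOf.getD v "기타") V)).contains "신구 비교" = true) ↔ "old_new_comparison" ∈ V := by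
    simp [PySem.Set.mem_ofList, pvG_old]
  have b4 : ((PySem.Set.ofList (List.map (fun v => pvLabelOf.getD v "기타") V)).contains "기타" = true) ↔
      ∃ v ∈ V, v ≠ "law_text" ∧ v ≠ "revision_reason" ∧ v ≠ "old_new_comparison" := by
    simp [PySem.Set.mem_ofList, pvG_other]
  simp only [m1, m2, m3, m4, b1, b2, b3, b4]
  split_ifs <;> rfl
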